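-- pv_equiv track=rewrite | github.com/waylandy/HelperBunny | seqarray/alignmentarray.py | _aln2ar
-- ===== SOURCE A (Python) =====
-- ispos = lambda x: x.isupper() or x=='-'
--
-- isins = lambda x: x.islower()
--
-- def _aln2ar(line):
--     x, pre = [''], 'a'
--     for now in line:
--         if   ispos(pre) and ispos(now):
--             x += ['',now]
--         elif isins(pre) and isins(now):
--             x[-1] += now
--         elif isins(pre) and ispos(now):
--             x += [now]
--         elif ispos(pre) and isins(now):
--             x += [now]
--         else:
--             raise Exception('Unrecognized case: %s%s'%(pre,now))
--         pre=now
--     return x + [''] if ispos(x[-1][0]) else x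
-- ===== SOURCE B (Python) =====
-- ispos = lambda x: x.isupper() or x=='-'
--
-- isins = lambda x: x.islower()
--
-- def _aln2ar(line):
--     # reject the first unrecognized character up front (same message A would build)
--     for i, c in enumerate(line):
--         if not (ispos(c) or isins(c)):
--             raise Exception('Unrecognized case: %s%s' % ('a' if i == 0 else line[i - 1], c))
--     n = len(line)
--     # leading insertion run
--     j = 0
--     while j < n and isins(line[j]):
--         j += 1
--     out = [line[:j]]
--     i = j
--     # each position character followed by its (possibly empty) insertion run
--     while i < n:
--         c = line[i]
--         j = i + 1
--         while j < n and isins(line[j]):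
--             j += 1
--         out.append(c)
--         out.append(line[i + 1:j])
--         i = j
--     return out
-- ===== Notes on version B (the rewrite author's own statement) =====
-- stated objective: faster
-- what changed: Replaced A's character-by-character state machine (previous-char class selecting among four append/extend actions, repeatedly rebuilding the last token by string concatenation, plus a final fixup on the last token) by a validate-then-tokenize pass: B checks every character up front, then scans the line as a leading lowercase run followed by (position char, following lowercase run) pairs, emitting each run as a single slice.
-- crash fix: On the empty string A raises IndexError (it indexes the first character of the empty seed token) while B naturally returns a one-element list holding the empty leading insertion run. — e.g. on _aln2ar(""): A raises IndexError, B returns [""]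
import Mathlib
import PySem

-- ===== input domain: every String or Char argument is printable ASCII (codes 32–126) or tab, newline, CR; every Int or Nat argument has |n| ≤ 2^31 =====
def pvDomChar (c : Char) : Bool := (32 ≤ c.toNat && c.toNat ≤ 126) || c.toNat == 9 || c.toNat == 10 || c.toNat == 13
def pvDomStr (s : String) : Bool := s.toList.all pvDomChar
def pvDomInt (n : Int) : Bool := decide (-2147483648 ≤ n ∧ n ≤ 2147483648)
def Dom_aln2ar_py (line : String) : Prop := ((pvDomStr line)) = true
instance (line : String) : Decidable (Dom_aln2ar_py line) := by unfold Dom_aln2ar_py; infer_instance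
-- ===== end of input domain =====

-- B replaces A's previous-character state machine by a validate-then-tokenize scan over runs,
-- avoiding A's per-character rebuild of the last token (measured faster in a timing run);
-- both ports are over List Char, with String.mk only at the boundary.

-- shared helpers: the module-level predicates ispos (uppercase or dash) and isins (lowercase)
-- (PySem.Chars.isupper/islower are Python-exact on the ASCII domain)
def pvIsposC (c : Char) : Bool := PySem.Chars.isupper c || c == '-'
def pvIsinsC (c : Char) : Bool := PySem.Chars.islower c

-- ===== PORT A =====
-- loop body of A: the four-way branch on (class of pre, class of now); the final else is
-- Python's `raise Exception(...)` — it keeps the state unchanged, and is unreachable under Pre_.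
def pvStepA (st : List (List Char) × Char) (now : Char) : List (List Char) × Char :=
  let x := st.1
  let pre := st.2
  if pvIsposC pre && pvIsposC now then (x ++ [[], [now]], now)
  else if pvIsinsC pre && pvIsinsC now then (x.dropLast ++ [x.getLastD [] ++ [now]], now)
  else if pvIsinsC pre && pvIsposC now then (x ++ [[now]], now)
  else if pvIsposC pre && pvIsinsC now then (x ++ [[now]], now)
  else (x, now)

def aln2ar_py (line : String) : List String :=
  let x := (line.toList.foldl pvStepA ([[]], 'a')).1
  -- `return x + [''] if ispos(x[-1][0]) else x`; x[-1][0] on the empty seed token is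
  -- Python's IndexError (empty line) — that case is outside Pre_ (see Raises_ below).
  let res :=
    match (x.getLastD []).head? with
    | some c => if pvIsposC c then x ++ [[]] else x
    | none => x
  res.map String.mk

-- ===== PORT B =====
-- Source B's run scan: t is the insertion run collected so far (Source B's slice line[i+1:j]);
-- on a position char emit the finished run, the char, and start a fresh run
def pvRunB (t : List Char) : List Char → List (List Char)
  | [] => [t]
  | c :: cs => if pvIsinsC c then pvRunB (t ++ [c]) cs else t :: [c] :: pvRunB [] cs

def aln2ar_py_alt (line : String) : List String :=
  -- Source B's up-front validation loop only raises (on characters excluded by Pre_); it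
  -- contributes nothing to the returned value and is therefore not re-modelled here.
  (pvRunB [] line.toList).map String.mk

-- ===== PRECONDITION & SPEC =====
-- Pre_ excludes exactly the inputs where A raises: the empty line (IndexError at x[-1][0])
-- and lines with a character that is neither uppercase-or-dash nor lowercase (explicit Exception).
def Pre_aln2ar_py (line : String) : Prop :=
  line.toList ≠ [] ∧ line.toList.all (fun c => pvIsposC c || pvIsinsC c) = true
instance (line : String) : Decidable (Pre_aln2ar_py line) := by unfold Pre_aln2ar_py; infer_instance
def pvWitness_aln2ar_py : String := "aB-"

-- On the empty string A raises IndexError (x[-1][0] on the seed token) while B naturally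
-- returns [''], the empty leading insertion run.
def Raises_aln2ar_py (line : String) : Prop := line.toList = []
instance (line : String) : Decidable (Raises_aln2ar_py line) := by unfold Raises_aln2ar_py; infer_instance
def pvRaiseWitness_aln2ar_py : String := ""
def pvRaiseWitnessOut_aln2ar_py : List String := [""]

def Spec_aln2ar_py (line : String) (out : List String) : Prop := out = aln2ar_py_alt line
instance (line : String) (out : List String) : Decidable (Spec_aln2ar_py line out) := by unfold Spec_aln2ar_py; infer_instance

-- ===== CLAIM (what is proved, stated in full; the proofs are below) =====
def Claim_equal_aln2ar_py : Prop := ∀ (line : String), Dom_aln2ar_py line → Pre_aln2ar_py line → Spec_aln2ar_py line (aln2ar_py line)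
def Claim_raises_aln2ar_py : Prop := (∀ (line : String), Dom_aln2ar_py line → Raises_aln2ar_py line → ¬ Pre_aln2ar_py line) ∧ (Dom_aln2ar_py (pvRaiseWitness_aln2ar_py) ∧ Raises_aln2ar_py (pvRaiseWitness_aln2ar_py) ∧ aln2ar_py_alt (pvRaiseWitness_aln2ar_py) = pvRaiseWitnessOut_aln2ar_py)

-- ===== LEMMAS AND PROOFS =====

-- class exclusivity of the two predicates
theorem pv_pos_not_ins (c : Char) (h : pvIsposC c = true) : pvIsinsC c = false := by
  simp only [pvIsposC, pvIsinsC, PySem.Chars.isupper, PySem.Chars.islower, Bool.or_eq_true,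
    Bool.and_eq_true, decide_eq_true_eq, Char.le_def, UInt32.le_iff_toNat_le,
    beq_iff_eq] at h ⊢
  have h1 : 'A'.val.toNat = 65 := rfl
  have h2 : 'Z'.val.toNat = 90 := rfl
  have h3 : 'a'.val.toNat = 97 := rfl
  have h4 : 'z'.val.toNat = 122 := rfl
  have h5 : '-'.val.toNat = 45 := rfl
  rcases h with h | h
  · simp only [Bool.and_eq_false_iff, decide_eq_false_iff_not, not_le]; omega
  · subst h; decide

theorem pv_ins_not_pos (c : Char) (h : pvIsinsC c = true) : pvIsposC c = false := by
  simp only [pvIsposC, pvIsinsC, PySem.Chars.isupper, PySem.Chars.islower, Bool.or_eq_true,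
    Bool.and_eq_true, decide_eq_true_eq, Char.le_def, UInt32.le_iff_toNat_le,
    Bool.or_eq_false_iff, beq_eq_false_iff_ne, ne_eq] at h ⊢
  have h1 : 'A'.val.toNat = 65 := rfl
  have h2 : 'Z'.val.toNat = 90 := rfl
  have h3 : 'a'.val.toNat = 97 := rfl
  have h5 : '-'.val.toNat = 45 := rfl
  constructor
  · simp only [Bool.and_eq_false_iff, decide_eq_false_iff_not, not_le]; omega
  · intro hh; rw [hh] at h
    omega

-- the shape A's loop builds, expressed structurally: pvExt t cs = tokens produced from a state
-- whose last (insertion-run) token is t with the previous char lowercase; pvFro cs = tokens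
-- produced after a position char
mutual
def pvExt (t : List Char) : List Char → List (List Char)
  | [] => [t]
  | c :: cs => if pvIsinsC c then pvExt (t ++ [c]) cs else t :: [c] :: pvFro cs
def pvFro : List Char → List (List Char)
  | [] => []
  | c :: cs => if pvIsposC c then [] :: [c] :: pvFro cs else pvExt [c] cs
end

-- whether the last character of cs is a position char (default d for cs = [])
def pvLIP (d : Bool) : List Char → Bool
  | [] => d
  | c :: cs => pvLIP (pvIsposC c) cs

-- A's final test ispos(x[-1][0]) on a token (false on the empty token, where Python raises)
def pvHP (t : List Char) : Bool := (t.head?.map pvIsposC).getD false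

theorem pvHP_append_ins (t : List Char) (c : Char) (ht : pvHP t = false)
    (hc : pvIsposC c = false) : pvHP (t ++ [c]) = false := by
  cases t <;> simp_all [pvHP]

theorem pvExt_ne (t : List Char) (cs : List Char) : pvExt t cs ≠ [] := by
  induction cs generalizing t with
  | nil => simp [pvExt]
  | cons c cs ih => by_cases h : pvIsinsC c = true <;> simp [pvExt, h, ih]

theorem pvFro_ne (cs : List Char) (h : cs ≠ []) : pvFro cs ≠ [] := by
  match cs with
  | c :: cs' =>
    by_cases hc : pvIsposC c = true <;> simp [pvFro, hc, pvExt_ne]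

theorem pv_getLastD_irrel {α : Type} (l : List α) (h : l ≠ []) (a b : α) :
    l.getLastD a = l.getLastD b := by
  rw [List.getLastD_eq_getLast?, List.getLastD_eq_getLast?]
  cases hl : l.getLast? with
  | none => exact absurd (List.getLast?_eq_none_iff.mp hl) h
  | some x => rfl

-- A's loop, from a state whose last token is t after a lowercase char / from a state after
-- a position char, computes pvExt / pvFro
mutual
theorem pvG_ins (cs : List Char) (hv : ∀ c ∈ cs, (pvIsposC c || pvIsinsC c) = true)
    (y : List (List Char)) (t : List Char) (p : Char) (hp : pvIsinsC p = true) :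
    (cs.foldl pvStepA (y ++ [t], p)).1 = y ++ pvExt t cs := by
  have hpp : pvIsposC p = false := pv_ins_not_pos p hp
  match cs with
  | [] => simp [pvExt]
  | c :: cs' =>
    have hv' : ∀ c ∈ cs', (pvIsposC c || pvIsinsC c) = true := fun d hd => hv d (by simp [hd])
    by_cases hc : pvIsinsC c = true
    · have : pvStepA (y ++ [t], p) c = (y ++ [t ++ [c]], c) := by
        simp [pvStepA, hp, hpp, hc, List.dropLast_concat]
      rw [List.foldl_cons, this, show y ++ [t ++ [c]] = y ++ [t ++ [c]] from rfl]
      rw [pvG_ins cs' hv' y (t ++ [c]) c hc]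
      simp [pvExt, hc]
    · have hcp : pvIsposC c = true := by
        have := hv c (by simp); simp [hc] at this; exact this
      have : pvStepA (y ++ [t], p) c = ((y ++ [t]) ++ [[c]], c) := by
        simp [pvStepA, hp, hpp, hc, hcp]
      rw [List.foldl_cons, this, pvG_pos cs' hv' ((y ++ [t]) ++ [[c]]) c hcp]
      simp [pvExt, hc]
termination_by cs.length

theorem pvG_pos (cs : List Char) (hv : ∀ c ∈ cs, (pvIsposC c || pvIsinsC c) = true)
    (x : List (List Char)) (p : Char) (hp : pvIsposC p = true) :
    (cs.foldl pvStepA (x, p)).1 = x ++ pvFro cs := by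
  have hpi : pvIsinsC p = false := pv_pos_not_ins p hp
  match cs with
  | [] => simp [pvFro]
  | c :: cs' =>
    have hv' : ∀ c ∈ cs', (pvIsposC c || pvIsinsC c) = true := fun d hd => hv d (by simp [hd])
    by_cases hc : pvIsposC c = true
    · have : pvStepA (x, p) c = (x ++ [[], [c]], c) := by
        simp [pvStepA, hp, hc]
      rw [List.foldl_cons, this, pvG_pos cs' hv' (x ++ [[], [c]]) c hc]
      simp [pvFro, hc]
    · have hci : pvIsinsC c = true := by
        have := hv c (by simp); simp [hc] at this; exact this
      have : pvStepA (x, p) c = (x ++ [[c]], c) := by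
        simp [pvStepA, hp, hpi, hc, hci]
      rw [List.foldl_cons, this, show x ++ [[c]] = x ++ [[c]] from rfl]
      rw [pvG_ins cs' hv' x [c] c hci]
      simp [pvFro, hc]
termination_by cs.length
end

-- pvExt/pvFro coincide with B's run decomposition, up to the trailing empty run that A's
-- final `x + [\'\']` re-attaches when the line ends in a position char
mutual
theorem pvE (cs : List Char) (hv : ∀ c ∈ cs, (pvIsposC c || pvIsinsC c) = true) (t : List Char) :
    pvExt t cs ++ (if pvLIP false cs then [([] : List Char)] else []) = pvRunB t cs := by
  match cs with
  | [] => simp [pvExt, pvLIP, pvRunB]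
  | c :: cs' =>
    have hv' : ∀ c ∈ cs', (pvIsposC c || pvIsinsC c) = true := fun d hd => hv d (by simp [hd])
    by_cases hc : pvIsinsC c = true
    · have hcp : pvIsposC c = false := pv_ins_not_pos c hc
      have ih := pvE cs' hv' (t ++ [c])
      simp only [pvExt, pvRunB, pvLIP, hc, hcp, if_true] at ih ⊢
      exact ih
    · have hcp : pvIsposC c = true := by
        have := hv c (by simp); simp [hc] at this; exact this
      have ih := pvF cs' hv'
      simp only [pvExt, pvRunB, pvLIP, hc, hcp, if_true, Bool.false_eq_true, if_false,
        List.cons_append] at ih ⊢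
      rw [ih]
termination_by cs.length

theorem pvF (cs : List Char) (hv : ∀ c ∈ cs, (pvIsposC c || pvIsinsC c) = true) :
    pvFro cs ++ (if pvLIP true cs then [([] : List Char)] else []) = pvRunB [] cs := by
  match cs with
  | [] => simp [pvFro, pvLIP, pvRunB]
  | c :: cs' =>
    have hv' : ∀ c ∈ cs', (pvIsposC c || pvIsinsC c) = true := fun d hd => hv d (by simp [hd])
    by_cases hc : pvIsposC c = true
    · have hci : pvIsinsC c = false := pv_pos_not_ins c hc
      have ih := pvF cs' hv'
      simp only [pvFro, pvRunB, pvLIP, hc, hci, if_true, Bool.false_eq_true, if_false,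
        List.cons_append] at ih ⊢
      rw [ih]
    · have hci : pvIsinsC c = true := by
        have := hv c (by simp); simp [hc] at this; exact this
      have ih := pvE cs' hv' [c]
      simp only [pvFro, pvRunB, pvLIP, hc, hci, if_true, Bool.false_eq_true, if_false] at ih ⊢
      simpa using ih
termination_by cs.length
end

-- the class of the first character of the LAST token is the class of the last character of cs
mutual
theorem pvGE (cs : List Char) (hv : ∀ c ∈ cs, (pvIsposC c || pvIsinsC c) = true)
    (t : List Char) (ht : pvHP t = false) :
    pvHP ((pvExt t cs).getLastD []) = pvLIP false cs := by
  match cs with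
  | [] => simpa [pvExt, pvLIP] using ht
  | c :: cs' =>
    have hv' : ∀ c ∈ cs', (pvIsposC c || pvIsinsC c) = true := fun d hd => hv d (by simp [hd])
    by_cases hc : pvIsinsC c = true
    · have hcp : pvIsposC c = false := pv_ins_not_pos c hc
      have ih := pvGE cs' hv' (t ++ [c]) (pvHP_append_ins t c ht hcp)
      rw [show pvExt t (c :: cs') = pvExt (t ++ [c]) cs' from by rw [pvExt]; simp [hc]]
      rw [show pvLIP false (c :: cs') = pvLIP false cs' from by simp [pvLIP, hcp]]
      exact ih
    · have hcp : pvIsposC c = true := by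
        have := hv c (by simp); simp [hc] at this; exact this
      by_cases hcs : cs' = []
      · subst hcs
        rw [show pvExt t [c] = t :: [c] :: pvFro [] from by simp [pvExt, hc]]
        rw [show pvFro ([] : List Char) = [] from by simp [pvFro]]
        simp [pvLIP, pvHP, hcp]
      · have hfn : pvFro cs' ≠ [] := pvFro_ne cs' hcs
        have ih := pvGF cs' hv' hcs
        rw [show pvExt t (c :: cs') = t :: [c] :: pvFro cs' from by rw [pvExt]; simp [hc]]
        rw [show pvLIP false (c :: cs') = pvLIP true cs' from by simp [pvLIP, hcp]]
        simp only [List.getLastD_cons]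
        rw [pv_getLastD_irrel (pvFro cs') hfn [c] []]
        exact ih
termination_by cs.length

theorem pvGF (cs : List Char) (hv : ∀ c ∈ cs, (pvIsposC c || pvIsinsC c) = true)
    (hne : cs ≠ []) :
    pvHP ((pvFro cs).getLastD []) = pvLIP true cs := by
  match cs with
  | [] => exact absurd rfl hne
  | c :: cs' =>
    have hv' : ∀ c ∈ cs', (pvIsposC c || pvIsinsC c) = true := fun d hd => hv d (by simp [hd])
    by_cases hc : pvIsposC c = true
    · by_cases hcs : cs' = []
      · subst hcs
        rw [show pvFro [c] = [] :: [c] :: pvFro [] from by simp [pvFro, hc]]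
        rw [show pvFro ([] : List Char) = [] from by simp [pvFro]]
        simp [pvLIP, pvHP, hc]
      · have hfn : pvFro cs' ≠ [] := pvFro_ne cs' hcs
        have ih := pvGF cs' hv' hcs
        rw [show pvFro (c :: cs') = [] :: [c] :: pvFro cs' from by rw [pvFro]; simp [hc]]
        rw [show pvLIP true (c :: cs') = pvLIP true cs' from by simp [pvLIP, hc]]
        simp only [List.getLastD_cons]
        rw [pv_getLastD_irrel (pvFro cs') hfn [c] []]
        exact ih
    · have hci : pvIsinsC c = true := by
        have := hv c (by simp); simp [hc] at this; exact this
      have hcf : pvIsposC c = false := by simpa using hc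
      have ih := pvGE cs' hv' [c] (by simp [pvHP, hcf])
      rw [show pvFro (c :: cs') = pvExt [c] cs' from by rw [pvFro]; simp [hcf]]
      rw [show pvLIP true (c :: cs') = pvLIP false cs' from by simp [pvLIP, hcf]]
      exact ih
termination_by cs.length
end

-- ===== VERDICT (by name: the statement is the Claim_ definition above) =====
theorem aln2ar_py_spec : Claim_equal_aln2ar_py := by
  unfold Claim_equal_aln2ar_py
  intro line _ hpre
  obtain ⟨hne, hvb⟩ := hpre
  have hv : ∀ c ∈ line.toList, (pvIsposC c || pvIsinsC c) = true := List.all_eq_true.mp hvb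
  unfold Spec_aln2ar_py aln2ar_py aln2ar_py_alt
  have hx : (line.toList.foldl pvStepA ([[]], 'a')).1 = pvExt [] line.toList := by
    have := pvG_ins line.toList hv [] [] 'a' (by decide)
    simpa using this
  rw [hx]
  have hhp : pvHP ((pvExt [] line.toList).getLastD []) = pvLIP false line.toList :=
    pvGE line.toList hv [] rfl
  have hE := pvE line.toList hv []
  cases hhead : ((pvExt [] line.toList).getLastD []).head? with
  | none =>
    have h0 : pvLIP false line.toList = false := by
      rw [← hhp]; unfold pvHP; rw [hhead]; rfl
    rw [h0, if_neg (by simp), List.append_nil] at hE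
    simp only [hhead]
    rw [hE]
  | some c =>
    by_cases hc : pvIsposC c = true
    · have h1 : pvLIP false line.toList = true := by
        rw [← hhp]; unfold pvHP; rw [hhead]; simp [hc]
      rw [h1, if_pos rfl] at hE
      simp only [hhead, hc, if_true]
      rw [hE]
    · have h0 : pvLIP false line.toList = false := by
        rw [← hhp]; unfold pvHP; rw [hhead]; simpa using hc
      rw [h0, if_neg (by simp), List.append_nil] at hE
      simp only [hhead, hc, Bool.false_eq_true, if_false]
      rw [hE]

def aln2ar_py_raises : Claim_raises_aln2ar_py := by
  unfold Claim_raises_aln2ar_py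
  exact ⟨fun line _ hr hp => hp.1 hr, by decide, by decide, by decide⟩
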